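-- pv_equiv track=rewrite | github.com/Abbiirr/meme-searcher | vidsearch/feedback/target_split.py | _take_groups
-- ===== SOURCE A (Python) =====
-- from typing import Any
--
-- def _take_groups(groups: list[list[dict[str, Any]]], target_count: int) -> tuple[list[list[dict[str, Any]]], list[list[dict[str, Any]]]]:
--     selected: list[list[dict[str, Any]]] = []
--     total = 0
--     while groups and total < target_count:
--         group = groups.pop(0)
--         selected.append(group)
--         total += len(group)
--     return selected, groups
-- ===== SOURCE B (Python) =====
-- from typing import Any
--
-- def _take_groups(groups: list[list[dict[str, Any]]], target_count: int) -> tuple[list[list[dict[str, Any]]], list[list[dict[str, Any]]]]: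
--     # Prefix-length table (cums[j] = total size of the first j groups), then a
--     # binary search for the first prefix whose total reaches target_count.
--     cums = [0]
--     for g in groups:
--         cums.append(cums[-1] + len(g))
--     lo, hi = 0, len(cums)
--     while lo < hi:
--         mid = (lo + hi) // 2
--         if cums[mid] < target_count:
--             lo = mid + 1
--         else:
--             hi = mid
--     k = min(lo, len(groups))
--     selected = groups[:k]
--     del groups[:k]
--     return selected, groups
-- ===== Notes on version B (the rewrite author's own statement) =====
-- stated objective: alternative
-- what changed: Replaces A's pop(0)+accumulate while-loop with a prefix-length table plus a binary search for the first prefix reaching target_count, then a single slice/del split; same in-place mutation of groups.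
import Mathlib
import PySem

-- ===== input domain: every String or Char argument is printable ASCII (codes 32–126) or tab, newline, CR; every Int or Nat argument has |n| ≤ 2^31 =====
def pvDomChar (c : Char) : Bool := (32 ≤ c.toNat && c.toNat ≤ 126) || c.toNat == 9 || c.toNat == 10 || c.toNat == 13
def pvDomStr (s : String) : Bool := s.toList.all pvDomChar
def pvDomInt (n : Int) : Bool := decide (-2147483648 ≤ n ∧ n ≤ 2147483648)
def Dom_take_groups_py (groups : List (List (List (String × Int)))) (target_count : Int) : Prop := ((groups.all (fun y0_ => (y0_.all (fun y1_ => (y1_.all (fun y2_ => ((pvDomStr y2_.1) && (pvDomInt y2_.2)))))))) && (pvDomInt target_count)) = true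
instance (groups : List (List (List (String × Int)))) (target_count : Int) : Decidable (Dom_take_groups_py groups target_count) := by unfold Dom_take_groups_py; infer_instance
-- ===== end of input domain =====

-- B replaces A's pop(0)+accumulate while-loop by a prefix-length table, a binary
-- search for the first prefix reaching target_count, and one take/drop split
-- (objective: alternative decomposition). The equivalence proved here is about
-- the RETURN value; both Pythons leave `groups` holding the same suffix.

-- ===== PORT A =====
-- the while loop of A: state = (remaining groups, selected so far, total)
def takeGroupsAux (groups : List (List (List (String × Int)))) (target_count : Int)
    (selected : List (List (List (String × Int)))) (total : Int) :
    (List (List (List (String × Int)))) × (List (List (List (String × Int)))) :=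
  match groups with
  | [] => (selected, [])
  | g :: rest =>
    if total < target_count then
      takeGroupsAux rest target_count (selected ++ [g]) (total + (g.length : Int))
    else (selected, g :: rest)

def take_groups_py (groups : List (List (List (String × Int)))) (target_count : Int) : (List (List (List (String × Int)))) × (List (List (List (String × Int)))) :=
  takeGroupsAux groups target_count [] 0

-- ===== PORT B =====
-- the `for g in groups: cums.append(cums[-1] + len(g))` loop of Source B
-- (cums[-1] on the always-nonempty list is `getLast?.getD 0`, exact here)
def buildCums (groups : List (List (List (String × Int)))) : List Int :=
  groups.foldl (fun cums g => cums ++ [cums.getLast?.getD 0 + (g.length : Int)]) [0]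

-- the `while lo < hi` binary-search loop of Source B (cums[mid] is always in range)
def bsearchAux (cums : List Int) (target_count : Int) (lo hi : Nat) : Nat :=
  if _h : lo < hi then
    let mid := (lo + hi) / 2
    if cums.getD mid 0 < target_count then bsearchAux cums target_count (mid + 1) hi
    else bsearchAux cums target_count lo mid
  else lo
termination_by hi - lo
decreasing_by all_goals omega

def take_groups_py_alt (groups : List (List (List (String × Int)))) (target_count : Int) : (List (List (List (String × Int)))) × (List (List (List (String × Int)))) :=
  let cums := buildCums groups
  let k := min (bsearchAux cums target_count 0 cums.length) groups.length
  (groups.take k, groups.drop k)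

-- ===== PRECONDITION & SPEC =====
def Spec_take_groups_py (groups : List (List (List (String × Int)))) (target_count : Int) (out : (List (List (List (String × Int)))) × (List (List (List (String × Int))))) : Prop := out = take_groups_py_alt groups target_count
instance (groups : List (List (List (String × Int)))) (target_count : Int) (out : (List (List (List (String × Int)))) × (List (List (List (String × Int))))) : Decidable (Spec_take_groups_py groups target_count out) := by unfold Spec_take_groups_py; infer_instance

-- ===== CLAIM (what is proved, stated in full; the proofs are below) =====
def Claim_equal_take_groups_py : Prop := ∀ (groups : List (List (List (String × Int)))) (target_count : Int), Dom_take_groups_py groups target_count → Spec_take_groups_py groups target_count (take_groups_py groups target_count)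

-- ===== LEMMAS AND PROOFS =====

-- number of groups A's loop takes, as a simple recursion on the list
def cnt (groups : List (List (List (String × Int)))) (t : Int) : Nat :=
  match groups with
  | [] => 0
  | g :: rest => if 0 < t then cnt rest (t - (g.length : Int)) + 1 else 0

-- sum of the lengths of the first j groups
def psum (groups : List (List (List (String × Int)))) (j : Nat) : Nat :=
  match groups, j with
  | _, 0 => 0
  | [], _ + 1 => 0
  | g :: rest, j + 1 => g.length + psum rest j

theorem psum_mono (groups : List (List (List (String × Int)))) :
    ∀ i j : Nat, i ≤ j → psum groups i ≤ psum groups j := by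
  induction groups with
  | nil => intro i j _; cases i <;> cases j <;> simp [psum]
  | cons g rest ih =>
    intro i j hij
    cases i with
    | zero => cases j <;> simp [psum]
    | succ i =>
      cases j with
      | zero => omega
      | succ j => simp only [psum]; have := ih i j (by omega); omega

-- A's loop computes take/drop of the first (cnt groups (target - total)) groups
theorem takeGroupsAux_eq (groups : List (List (List (String × Int)))) :
    ∀ (target_count total : Int) (selected : List (List (List (String × Int)))),
      takeGroupsAux groups target_count selected total =
        (selected ++ groups.take (cnt groups (target_count - total)),
         groups.drop (cnt groups (target_count - total))) := by
  induction groups with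
  | nil => intro t total sel; simp [takeGroupsAux, cnt]
  | cons g rest ih =>
    intro t total sel
    by_cases h : total < t
    · have h0 : 0 < t - total := by omega
      simp only [takeGroupsAux, if_pos h, cnt, if_pos h0, ih,
        List.take_succ_cons, List.drop_succ_cons, List.append_assoc,
        List.singleton_append]
      congr 2 <;> ring_nf
    · have h0 : ¬ 0 < t - total := by omega
      simp [takeGroupsAux, if_neg h, cnt]

-- cnt is the first index whose prefix sum reaches t (capped at the length)
theorem cnt_spec (groups : List (List (List (String × Int)))) :
    ∀ t : Int, cnt groups t ≤ groups.length ∧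
      (∀ j < cnt groups t, (psum groups j : Int) < t) ∧
      (cnt groups t < groups.length → t ≤ (psum groups (cnt groups t) : Int)) := by
  induction groups with
  | nil => intro t; simp [cnt]
  | cons g rest ih =>
    intro t
    by_cases h : 0 < t
    · obtain ⟨h1, h2, h3⟩ := ih (t - (g.length : Int))
      simp only [cnt, if_pos h, List.length_cons]
      refine ⟨by omega, ?_, ?_⟩
      · intro j hj
        cases j with
        | zero => simpa [psum] using h
        | succ j =>
          have := h2 j (by omega)
          simp only [psum]; push_cast; push_cast at this; omega
      · intro hlt
        have := h3 (by omega)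
        simp only [psum]; push_cast; push_cast at this; omega
    · simp only [cnt, if_neg h]
      exact ⟨by omega, by omega, fun _ => by simp [psum]; omega⟩

-- characterization of the binary-search loop on a monotone table
theorem bsearchAux_spec (cums : List Int) (t : Int)
    (mono : ∀ i j : Nat, i ≤ j → j < cums.length → cums.getD i 0 ≤ cums.getD j 0) :
    ∀ lo hi : Nat, lo ≤ hi → hi ≤ cums.length →
      lo ≤ bsearchAux cums t lo hi ∧ bsearchAux cums t lo hi ≤ hi ∧
      (∀ i, lo ≤ i → i < bsearchAux cums t lo hi → cums.getD i 0 < t) ∧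
      (bsearchAux cums t lo hi < hi → t ≤ cums.getD (bsearchAux cums t lo hi) 0) := by
  intro lo hi
  induction hn : hi - lo using Nat.strong_induction_on generalizing lo hi with
  | _ n ihn =>
  intro hlohi hhi
  by_cases h : lo < hi
  · rw [bsearchAux]
    simp only [dif_pos h]
    set mid := (lo + hi) / 2 with hmid
    have hm1 : lo ≤ mid := by omega
    have hm2 : mid < hi := by omega
    by_cases hc : cums.getD mid 0 < t
    · simp only [if_pos hc]
      obtain ⟨a1, a2, a3, a4⟩ := ihn (hi - (mid + 1)) (by omega) (mid + 1) hi rfl (by omega) hhi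
      refine ⟨by omega, a2, ?_, a4⟩
      intro i hi1 hi2
      by_cases him : i ≤ mid
      · exact lt_of_le_of_lt (mono i mid him (by omega)) hc
      · exact a3 i (by omega) hi2
    · simp only [if_neg hc]
      obtain ⟨a1, a2, a3, a4⟩ := ihn (mid - lo) (by omega) lo mid rfl (by omega) (by omega)
      refine ⟨a1, by omega, a3, ?_⟩
      intro hr
      by_cases hrm : bsearchAux cums t lo mid < mid
      · exact a4 hrm
      · have : bsearchAux cums t lo mid = mid := by omega
        rw [this]; omega
  · rw [bsearchAux]; simp only [dif_neg h]
    exact ⟨le_refl _, by omega, by omega, by omega⟩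

-- the recursion Source B's table-building loop unfolds to
def cumList (groups : List (List (List (String × Int)))) (acc : Int) : List Int :=
  match groups with
  | [] => [acc]
  | g :: rest => acc :: cumList rest (acc + (g.length : Int))

theorem buildCums_foldl (groups : List (List (List (String × Int)))) :
    ∀ (pre : List Int) (acc : Int),
      groups.foldl (fun cums g => cums ++ [cums.getLast?.getD 0 + (g.length : Int)]) (pre ++ [acc])
        = pre ++ cumList groups acc := by
  induction groups with
  | nil => intro pre acc; simp [cumList]
  | cons g rest ih =>
    intro pre acc
    simp only [List.foldl_cons, cumList]
    have hlast : (pre ++ [acc]).getLast?.getD 0 = acc := by simp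
    rw [hlast, List.append_assoc]
    have := ih (pre ++ [acc]) (acc + (g.length : Int))
    simpa [List.append_assoc] using this

theorem buildCums_eq (groups : List (List (List (String × Int)))) :
    buildCums groups = cumList groups 0 := by
  have := buildCums_foldl groups [] 0
  simpa [buildCums] using this

theorem cumList_length (groups : List (List (List (String × Int)))) :
    ∀ acc, (cumList groups acc).length = groups.length + 1 := by
  induction groups with
  | nil => intro acc; simp [cumList]
  | cons g rest ih => intro acc; simp [cumList, ih]

theorem cumList_getD (groups : List (List (List (String × Int)))) :
    ∀ (acc : Int) (j : Nat), j ≤ groups.length →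
      (cumList groups acc).getD j 0 = acc + (psum groups j : Int) := by
  induction groups with
  | nil =>
    intro acc j hj
    have hj0 : j = 0 := by simpa using hj
    subst hj0; simp [cumList, psum]
  | cons g rest ih =>
    intro acc j hj
    cases j with
    | zero => simp [cumList, psum]
    | succ j =>
      simp only [cumList, List.getD_cons_succ, psum]
      rw [ih (acc + (g.length : Int)) j (by simpa using hj)]
      push_cast; ring

-- Source B's k equals A's cnt
theorem k_eq_cnt (groups : List (List (List (String × Int)))) (t : Int) :
    min (bsearchAux (buildCums groups) t 0 (buildCums groups).length) groups.length
      = cnt groups t := by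
  rw [buildCums_eq]
  set cums := cumList groups 0 with hcums
  have hlen : cums.length = groups.length + 1 := cumList_length groups 0
  have hget : ∀ j : Nat, j ≤ groups.length → cums.getD j 0 = (psum groups j : Int) := by
    intro j hj; rw [hcums, cumList_getD groups 0 j hj]; ring
  have mono : ∀ i j : Nat, i ≤ j → j < cums.length → cums.getD i 0 ≤ cums.getD j 0 := by
    intro i j hij hj
    rw [hget i (by omega), hget j (by omega)]
    exact_mod_cast psum_mono groups i j hij
  obtain ⟨b1, b2, b3, b4⟩ := bsearchAux_spec cums t mono 0 cums.length (by omega) (le_refl _)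
  set r := bsearchAux cums t 0 cums.length with hr
  set k := min r groups.length with hk
  obtain ⟨c1, c2, c3⟩ := cnt_spec groups t
  -- both k and cnt are the minimal index whose prefix sum reaches t, capped
  by_cases hlt : k < cnt groups t
  · exfalso
    have h1 : (psum groups k : Int) < t := c2 k hlt
    have hkr : k = r := by omega
    have h2 : t ≤ cums.getD k 0 := hkr ▸ b4 (by omega)
    rw [hget k (by omega)] at h2; omega
  · by_cases hgt : cnt groups t < k
    · exfalso
      have h1 : cums.getD (cnt groups t) 0 < t := b3 (cnt groups t) (by omega) (by omega)
      rw [hget _ c1] at h1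
      have h2 : t ≤ (psum groups (cnt groups t) : Int) := c3 (by omega)
      omega
    · omega

-- ===== VERDICT (by name: the statement is the Claim_ definition above) =====
theorem take_groups_py_spec : Claim_equal_take_groups_py := by
  intro groups target_count _
  unfold Spec_take_groups_py take_groups_py take_groups_py_alt
  rw [takeGroupsAux_eq]
  show _ = (List.take (min (bsearchAux (buildCums groups) target_count 0 (buildCums groups).length) groups.length) groups, _)
  rw [k_eq_cnt]
  simp
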